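-- pv_equiv track=rewrite | github.com/fosscord/fossbotpy | fossbotpy/utils/permissions.py | calculate_overwrites
-- ===== SOURCE A (Python) =====
-- class PERMS:
-- 	'''
-- 	https://discord.com/developers/docs/topics/permissions#permissions-bitwise-permission-flags
-- 	'''
-- 	# Name                      Value           Description
-- 	CREATE_INSTANT_INVITE   =   1 << 0 #        Allows creation of instant invites
-- 	KICK_MEMBERS            =   1 << 1 #        Allows kicking members
-- 	BAN_MEMBERS             =   1 << 2 #        Allows banning members
-- 	ADMINISTRATOR           =   1 << 3 #        Allows all permissions and bypasses channel permission overwrites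
-- 	MANAGE_CHANNELS         =   1 << 4 #        Allows management and editing of channels
-- 	MANAGE_GUILD            =   1 << 5 #        Allows management and editing of the guild
-- 	ADD_REACTIONS           =   1 << 6 #        Allows for the addition of reactions to messages
-- 	VIEW_AUDIT_LOG          =   1 << 7 #        Allows for viewing of audit logs
-- 	PRIORITY_SPEAKER        =   1 << 8 #        Allows for using priority speaker in a voice channel
-- 	STREAM                  =   1 << 9 #        Allows the user to go live
-- 	VIEW_CHANNEL            =   1 << 10 #       Allows guild members to view a channel, which includes reading messages in text channels
-- 	SEND_MESSAGES           =   1 << 11 #       Allows for sending messages in a channel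
-- 	SEND_TTS_MESSAGES       =   1 << 12 #       Allows for sending of /tts messages
-- 	MANAGE_MESSAGES         =   1 << 13 #       Allows for deletion of other users messages
-- 	EMBED_LINKS             =   1 << 14 #       Links sent by users with this permission will be auto-embedded
-- 	ATTACH_FILES            =   1 << 15 #       Allows for uploading images and files
-- 	READ_MESSAGE_HISTORY    =   1 << 16 #       Allows for reading of message history
-- 	MENTION_EVERYONE        =   1 << 17 #       Allows for using the @everyone tag to notify all users in a channel, and the @here tag to notify all online users in a channel
-- 	USE_EXTERNAL_EMOJIS     =   1 << 18 #       Allows the usage of custom emojis from other servers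
-- 	VIEW_GUILD_INSIGHTS     =   1 << 19 #       Allows for viewing guild insights
-- 	CONNECT                 =   1 << 20 #       Allows for joining of a voice channel
-- 	SPEAK                   =   1 << 21 #       Allows for speaking in a voice channel
-- 	MUTE_MEMBERS            =   1 << 22 #       Allows for muting members in a voice channel
-- 	DEAFEN_MEMBERS          =   1 << 23 #       Allows for deafening of members in a voice channel
-- 	MOVE_MEMBERS            =   1 << 24 #       Allows for moving of members between voice channels
-- 	USE_VAD                 =   1 << 25 #       Allows for using voice-activity-detection in a voice channel
-- 	CHANGE_NICKNAME         =   1 << 26 #       Allows for modification of own nickname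
-- 	MANAGE_NICKNAMES        =   1 << 27 #       Allows for modification of other users nicknames
-- 	MANAGE_ROLES            =   1 << 28 #       Allows management and editing of roles
-- 	MANAGE_WEBHOOKS         =   1 << 29 #       Allows management and editing of webhooks
-- 	MANAGE_EMOJIS           =   1 << 30 #       Allows management and editing of emojis
-- 	USE_SLASH_COMMANDS      =   1 << 31 #       Allows members to use slash commands in text channels
-- 	REQUEST_TO_SPEAK        =   1 << 32 #       Allows for requesting to speak in stage channels.
-- 	#GUILD_EVENTS           =   1 << 33 #       Allows for interacting with guild events
-- 	MANAGE_THREADS          =   1 << 34 #       Allows for deleting and archiving threads, and viewing all private threads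
-- 	USE_PUBLIC_THREADS      =   1 << 35 #       Allows for creating and participating in threads
-- 	USE_PRIVATE_THREADS     =   1 << 36 #       Allows for creating and participating in private threads
-- 	ALL                     =   128849018879 #  all the perms
--
-- def calculate_overwrites(member_id, guild_id, base_permissions, channel_overwrites, member_roles):
-- 	# ADMINISTRATOR overrides any potential permission overwrites, so there is nothing to do here.
-- 	if base_permissions & PERMS.ADMINISTRATOR == PERMS.ADMINISTRATOR:
-- 		return PERMS.ALL
--
-- 	permissions = base_permissions
-- 	channel_everyone_overwrites = next((i for i in channel_overwrites if i['id']==guild_id), False) #https://stackoverflow.com/a/8653568/14776493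
-- 	if channel_everyone_overwrites:
-- 		permissions &= ~int(channel_everyone_overwrites['deny'])
-- 		permissions |= int(channel_everyone_overwrites['allow'])
--
-- 	# Apply role specific overwrites.
-- 	allow = 0
-- 	deny = 0
-- 	for member_role_id in member_roles: #for the pertinent roles
-- 		overwrite_role = next((i for i in channel_overwrites if i['id']==member_role_id), False) #get the corresponding channel overrides
-- 		if overwrite_role:
-- 			allow |= int(overwrite_role['allow'])
-- 			deny |= int(overwrite_role['deny'])
--
-- 	permissions &= ~deny
-- 	permissions |= allow
--
-- 	# Apply member specific overwrite if it exist.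
-- 	overwrite_member = next((i for i in channel_overwrites if i['id']==member_id), False)
-- 	if overwrite_member:
-- 		permissions &= ~int(overwrite_member['deny'])
-- 		permissions |= int(overwrite_member['allow'])
--
-- 	return permissions
-- ===== SOURCE B (Python) =====
-- def calculate_overwrites(member_id, guild_id, base_permissions, channel_overwrites, member_roles):
-- 	ADMINISTRATOR = 1 << 3
-- 	ALL = 128849018879
-- 	# ADMINISTRATOR overrides any potential permission overwrites.
-- 	if base_permissions & ADMINISTRATOR == ADMINISTRATOR:
-- 		return ALL
--
-- 	# Single pass over the overwrites, classifying each one into up to three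
-- 	# buckets as we go: the first @everyone overwrite, OR-accumulated role
-- 	# allow/deny (first occurrence of each id wins, like next()'s first match),
-- 	# and the first member-specific overwrite.  The three tests are independent,
-- 	# so an id belonging to several buckets is counted in each of them.
-- 	roles = set(member_roles)
-- 	seen = set()
-- 	everyone = None
-- 	member = None
-- 	allow = 0
-- 	deny = 0
-- 	for ow in channel_overwrites:
-- 		ow_id = ow['id']
-- 		if everyone is None and ow_id == guild_id:
-- 			everyone = ow
-- 		if ow_id in roles and ow_id not in seen:
-- 			allow |= int(ow['allow'])
-- 			deny |= int(ow['deny'])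
-- 		if member is None and ow_id == member_id:
-- 			member = ow
-- 		seen.add(ow_id)
--
-- 	permissions = base_permissions
-- 	if everyone is not None:
-- 		permissions &= ~int(everyone['deny'])
-- 		permissions |= int(everyone['allow'])
-- 	permissions &= ~deny
-- 	permissions |= allow
-- 	if member is not None:
-- 		permissions &= ~int(member['deny'])
-- 		permissions |= int(member['allow'])
-- 	return permissions
-- ===== Notes on version B (the rewrite author's own statement) =====
-- stated objective: alternative
-- what changed: B makes one pass over channel_overwrites with an accumulator (first everyone overwrite, OR-accumulated role allow/deny with a seen-set so each id counts once, first member overwrite) instead of A's separate next()-scan per role plus two more scans, then applies the three buckets in A's order.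
import Mathlib
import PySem

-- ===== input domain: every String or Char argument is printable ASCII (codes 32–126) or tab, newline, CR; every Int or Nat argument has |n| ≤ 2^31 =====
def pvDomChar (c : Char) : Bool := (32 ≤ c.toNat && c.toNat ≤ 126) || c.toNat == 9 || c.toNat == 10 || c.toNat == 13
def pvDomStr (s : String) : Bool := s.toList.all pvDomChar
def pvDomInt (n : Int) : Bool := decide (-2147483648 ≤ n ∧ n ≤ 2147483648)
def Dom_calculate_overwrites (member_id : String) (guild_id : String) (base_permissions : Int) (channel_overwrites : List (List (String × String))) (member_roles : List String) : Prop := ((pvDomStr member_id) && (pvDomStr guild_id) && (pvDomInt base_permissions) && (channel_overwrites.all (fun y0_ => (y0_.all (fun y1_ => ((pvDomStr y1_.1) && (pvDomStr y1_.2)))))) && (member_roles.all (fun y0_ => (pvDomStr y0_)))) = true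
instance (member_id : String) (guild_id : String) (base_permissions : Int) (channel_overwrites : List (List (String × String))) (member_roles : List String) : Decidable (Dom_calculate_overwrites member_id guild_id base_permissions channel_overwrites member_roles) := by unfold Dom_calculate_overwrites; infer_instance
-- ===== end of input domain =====

-- B replaces A's per-role next()-scans (plus the everyone/member scans) by ONE pass over
-- channel_overwrites that classifies each overwrite into three buckets; same bit operations, same order.


-- shared renderings of Python builtins: d[k] on an association-list dict, and int(s)
def pvLookup {α : Type} (l : List (String × α)) (k : String) : Option α :=
  (l.find? (fun p => p.1 == k)).map (·.2)

def pvInt (s : String) : Int := (PySem.Int.ofStr? s).getD 0  -- int(s); Pre_ guarantees the parse succeeds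

-- ===== PORT A =====
def calculate_overwrites (member_id : String) (guild_id : String) (base_permissions : Int) (channel_overwrites : List (List (String × String))) (member_roles : List String) : Int :=
  if PySem.Int.band base_permissions 8 = 8 then 128849018879
  else
    let permissions := base_permissions
    let permissions :=
      match channel_overwrites.find? (fun i => pvLookup i "id" == some guild_id) with
      | some d => PySem.Int.bor (PySem.Int.band permissions (Int.not (pvInt ((pvLookup d "deny").getD "")))) (pvInt ((pvLookup d "allow").getD ""))
      | none => permissions
    let ad := member_roles.foldl (fun (ad : Int × Int) member_role_id =>
        match channel_overwrites.find? (fun i => pvLookup i "id" == some member_role_id) with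
        | some d => (PySem.Int.bor ad.1 (pvInt ((pvLookup d "allow").getD "")), PySem.Int.bor ad.2 (pvInt ((pvLookup d "deny").getD "")))
        | none => ad) ((0 : Int), (0 : Int))
    let permissions := PySem.Int.bor (PySem.Int.band permissions (Int.not ad.2)) ad.1
    match channel_overwrites.find? (fun i => pvLookup i "id" == some member_id) with
    | some d => PySem.Int.bor (PySem.Int.band permissions (Int.not (pvInt ((pvLookup d "deny").getD "")))) (pvInt ((pvLookup d "allow").getD ""))
    | none => permissions

-- ===== PORT B =====
-- one loop iteration of B's single pass: classify ow into the everyone / role / member buckets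
-- (the `none` branch is a totality guard: Python raises KeyError on ow['id'] there, excluded by Pre_)
def pvStep (guild_id member_id : String) (roles : PySem.Set String)
    (st : Option (List (String × String)) × Int × Int × Option (List (String × String)) × PySem.Set String)
    (ow : List (String × String)) :
    Option (List (String × String)) × Int × Int × Option (List (String × String)) × PySem.Set String :=
  match pvLookup ow "id" with
  | none => st
  | some ow_id =>
    let everyone := if st.1.isNone && (ow_id == guild_id) then some ow else st.1
    let ad := if roles.contains ow_id && !(st.2.2.2.2.contains ow_id) then
        (PySem.Int.bor st.2.1 (pvInt ((pvLookup ow "allow").getD "")),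
         PySem.Int.bor st.2.2.1 (pvInt ((pvLookup ow "deny").getD "")))
      else (st.2.1, st.2.2.1)
    let member := if st.2.2.2.1.isNone && (ow_id == member_id) then some ow else st.2.2.2.1
    (everyone, ad.1, ad.2, member, st.2.2.2.2.add ow_id)

def calculate_overwrites_alt (member_id : String) (guild_id : String) (base_permissions : Int) (channel_overwrites : List (List (String × String))) (member_roles : List String) : Int :=
  if PySem.Int.band base_permissions 8 = 8 then 128849018879
  else
    let roles := PySem.Set.ofList member_roles
    let st := channel_overwrites.foldl (pvStep guild_id member_id roles)
      (none, (0 : Int), (0 : Int), none, PySem.Set.empty)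
    let permissions := base_permissions
    let permissions :=
      match st.1 with
      | some everyone => PySem.Int.bor (PySem.Int.band permissions (Int.not (pvInt ((pvLookup everyone "deny").getD "")))) (pvInt ((pvLookup everyone "allow").getD ""))
      | none => permissions
    let permissions := PySem.Int.bor (PySem.Int.band permissions (Int.not st.2.2.1)) st.2.1
    match st.2.2.2.1 with
    | some member => PySem.Int.bor (PySem.Int.band permissions (Int.not (pvInt ((pvLookup member "deny").getD "")))) (pvInt ((pvLookup member "allow").getD ""))
    | none => permissions

-- ===== PRECONDITION & SPEC =====
def pvEntryOK (d : List (String × String)) : Bool :=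
  (match pvLookup d "allow" with | some s => (PySem.Int.ofStr? s).isSome | none => false) &&
  (match pvLookup d "deny" with | some s => (PySem.Int.ofStr? s).isSome | none => false)

-- Pre_ excludes exactly the inputs where Python raises (KeyError on a missing 'id'/'allow'/'deny' key,
-- ValueError on a non-int-parsable 'allow'/'deny' of a consulted overwrite); it is slightly narrower than
-- A's raise set in one respect: it demands an 'id' key in EVERY overwrite, including ones A's early-stopping
-- scans may never reach (B's single pass reads every ow['id'] and would raise there) — see the cite in claim.json.
def Pre_calculate_overwrites (member_id : String) (guild_id : String) (base_permissions : Int) (channel_overwrites : List (List (String × String))) (member_roles : List String) : Prop :=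
  PySem.Int.band base_permissions 8 = 8 ∨
  ((∀ d ∈ channel_overwrites, (pvLookup d "id").isSome = true) ∧
   ∀ x ∈ guild_id :: member_id :: member_roles,
     (channel_overwrites.find? (fun i => pvLookup i "id" == some x)).all pvEntryOK = true)
instance (member_id : String) (guild_id : String) (base_permissions : Int) (channel_overwrites : List (List (String × String))) (member_roles : List String) : Decidable (Pre_calculate_overwrites member_id guild_id base_permissions channel_overwrites member_roles) := by unfold Pre_calculate_overwrites; infer_instance

def pvWitness_calculate_overwrites : String × String × Int × (List (List (String × String))) × List String :=
  ("m", "g", 0, [[("id", "g"), ("allow", "1"), ("deny", "2")]], ["r"])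

def Spec_calculate_overwrites (member_id : String) (guild_id : String) (base_permissions : Int) (channel_overwrites : List (List (String × String))) (member_roles : List String) (out : Int) : Prop := out = calculate_overwrites_alt member_id guild_id base_permissions channel_overwrites member_roles
instance (member_id : String) (guild_id : String) (base_permissions : Int) (channel_overwrites : List (List (String × String))) (member_roles : List String) (out : Int) : Decidable (Spec_calculate_overwrites member_id guild_id base_permissions channel_overwrites member_roles out) := by unfold Spec_calculate_overwrites; infer_instance

-- ===== CLAIM (what is proved, stated in full; the proofs are below) =====
def Claim_equal_calculate_overwrites : Prop := ∀ (member_id : String) (guild_id : String) (base_permissions : Int) (channel_overwrites : List (List (String × String))) (member_roles : List String), Dom_calculate_overwrites member_id guild_id base_permissions channel_overwrites member_roles → Pre_calculate_overwrites member_id guild_id base_permissions channel_overwrites member_roles → Spec_calculate_overwrites member_id guild_id base_permissions channel_overwrites member_roles (calculate_overwrites member_id guild_id base_permissions channel_overwrites member_roles)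

-- ===== LEMMAS AND PROOFS =====

-- ---- bitwise-or algebra: PySem.Int.bor is associative and idempotent ----
theorem pv_nat_ldiff_eq_sub : ∀ (n m : Nat), Nat.ldiff n m = n - (n &&& m) := by
  intro n
  induction n using Nat.binaryRec with
  | zero => intro m; simp [Nat.ldiff]
  | bit a n ih =>
    intro m
    induction m using Nat.binaryRec with
    | zero => simp [Nat.ldiff]
    | bit b m _ =>
      rw [Nat.ldiff_bit, Nat.land_bit, ih]
      have h1 : n &&& m ≤ n := Nat.and_le_left
      simp [Nat.bit_val]
      cases a <;> cases b <;> simp <;> omega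

theorem pv_bor_eq_lor (a b : Int) : PySem.Int.bor a b = Int.lor a b := by
  rcases a with m | m <;> rcases b with n | n <;>
    simp [PySem.Int.bor, Int.lor, pv_nat_ldiff_eq_sub, Int.negSucc_eq] <;> omega

theorem pv_int_eq_of_testBit_eq {a b : Int} (h : ∀ i, a.testBit i = b.testBit i) : a = b := by
  rcases a with m | m <;> rcases b with n | n
  · exact congrArg _ (Nat.eq_of_testBit_eq fun i => by simpa [Int.testBit] using h i)
  · exfalso
    have hk := h (m + n)
    have hm : m < 2 ^ (m + n) := lt_of_lt_of_le (Nat.lt_two_pow_self) (Nat.pow_le_pow_right (by norm_num) (by omega))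
    have hn : n < 2 ^ (m + n) := lt_of_lt_of_le (Nat.lt_two_pow_self) (Nat.pow_le_pow_right (by norm_num) (by omega))
    simp [Int.testBit, Nat.testBit_lt_two_pow hm, Nat.testBit_lt_two_pow hn] at hk
  · exfalso
    have hk := h (m + n)
    have hm : m < 2 ^ (m + n) := lt_of_lt_of_le (Nat.lt_two_pow_self) (Nat.pow_le_pow_right (by norm_num) (by omega))
    have hn : n < 2 ^ (m + n) := lt_of_lt_of_le (Nat.lt_two_pow_self) (Nat.pow_le_pow_right (by norm_num) (by omega))
    simp [Int.testBit, Nat.testBit_lt_two_pow hm, Nat.testBit_lt_two_pow hn] at hk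
  · refine congrArg Int.negSucc (Nat.eq_of_testBit_eq fun i => ?_)
    have hi := h i
    simp only [Int.testBit] at hi
    exact Bool.not_inj hi

theorem pv_bor_assoc (a b c : Int) : PySem.Int.bor (PySem.Int.bor a b) c = PySem.Int.bor a (PySem.Int.bor b c) := by
  simp only [pv_bor_eq_lor]
  exact pv_int_eq_of_testBit_eq fun i => by simp [Int.testBit_lor, Bool.or_assoc]

theorem pv_bor_self (a : Int) : PySem.Int.bor a a = a := by
  simp only [pv_bor_eq_lor]
  exact pv_int_eq_of_testBit_eq fun i => by simp [Int.testBit_lor]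

-- ---- pairs of (allow, deny) masks under componentwise or ----
def pvOr (x y : Int × Int) : Int × Int := (PySem.Int.bor x.1 y.1, PySem.Int.bor x.2 y.2)

theorem pvOr_comm (x y : Int × Int) : pvOr x y = pvOr y x := by
  simp [pvOr, PySem.Int.bor_comm]

theorem pvOr_assoc (x y z : Int × Int) : pvOr (pvOr x y) z = pvOr x (pvOr y z) := by
  simp [pvOr, pv_bor_assoc]

theorem pvOr_self (x : Int × Int) : pvOr x x = x := by
  simp [pvOr, pv_bor_self]

theorem pvOr_zero (x : Int × Int) : pvOr x (0, 0) = x := by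
  simp [pvOr, PySem.Int.bor_zero]

theorem pvOr_zero_left (x : Int × Int) : pvOr (0, 0) x = x := by
  rw [pvOr_comm]; exact pvOr_zero x

theorem pv_foldl_pvOr_init (l : List (Int × Int)) : ∀ (a : Int × Int),
    List.foldl pvOr a l = pvOr a (List.foldl pvOr (0, 0) l) := by
  induction l with
  | nil => intro a; simp [pvOr_zero]
  | cons x l ih =>
    intro a
    simp only [List.foldl_cons]
    rw [ih (pvOr a x), ih (pvOr (0, 0) x), pvOr_zero_left, pvOr_assoc]

-- the OR-fold of a list of masks depends only on which masks occur in it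
theorem pv_big_absorb (x : Int × Int) (l : List (Int × Int)) (h : x ∈ l) :
    pvOr (List.foldl pvOr (0, 0) l) x = List.foldl pvOr (0, 0) l := by
  induction l with
  | nil => simp at h
  | cons y l ih =>
    simp only [List.foldl_cons]
    rw [pv_foldl_pvOr_init, pvOr_zero_left]
    rcases List.mem_cons.mp h with rfl | hx
    · rw [pvOr_assoc, pvOr_comm (List.foldl pvOr (0, 0) l) x, ← pvOr_assoc, pvOr_self]
    · rw [pvOr_assoc, ih hx]

theorem pv_big_subset (l1 l2 : List (Int × Int)) (h : ∀ x ∈ l1, x ∈ l2) :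
    pvOr (List.foldl pvOr (0, 0) l2) (List.foldl pvOr (0, 0) l1) = List.foldl pvOr (0, 0) l2 := by
  induction l1 with
  | nil => simp [pvOr_zero]
  | cons x l ih =>
    simp only [List.foldl_cons]
    rw [pv_foldl_pvOr_init l (pvOr (0, 0) x), pvOr_zero_left, ← pvOr_assoc]
    rw [pv_big_absorb x l2 (h x List.mem_cons_self)]
    exact ih (fun y hy => h y (List.mem_cons_of_mem _ hy))

theorem pv_big_set_eq (l1 l2 : List (Int × Int)) (h : ∀ x, x ∈ l1 ↔ x ∈ l2) :
    List.foldl pvOr (0, 0) l1 = List.foldl pvOr (0, 0) l2 := by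
  have h1 := pv_big_subset l1 l2 (fun x hx => (h x).mp hx)
  have h2 := pv_big_subset l2 l1 (fun x hx => (h x).mpr hx)
  rw [← h1, pvOr_comm, h2]

-- ---- characterisation of B's single pass ----
def pvC (ow : List (String × String)) : Int × Int :=
  (pvInt ((pvLookup ow "allow").getD ""), pvInt ((pvLookup ow "deny").getD ""))

-- the role-bucket contributions B's pass collects, in overwrite order (first occurrence of each id)
def pvL (roles : PySem.Set String) (ows : List (List (String × String))) (s : PySem.Set String) : List (Int × Int) :=
  match ows with
  | [] => []
  | ow :: rest =>
    match pvLookup ow "id" with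
    | none => pvL roles rest s
    | some k =>
      if roles.contains k && !(s.contains k) then pvC ow :: pvL roles rest (s.add k)
      else pvL roles rest (s.add k)

theorem pvL_cons_none (roles : PySem.Set String) (ow : List (String × String)) (rest : List (List (String × String))) (s : PySem.Set String)
    (hid : pvLookup ow "id" = none) : pvL roles (ow :: rest) s = pvL roles rest s := by
  simp only [pvL, hid]

theorem pvL_cons_some (roles : PySem.Set String) (ow : List (String × String)) (rest : List (List (String × String))) (s : PySem.Set String) (k : String)
    (hid : pvLookup ow "id" = some k) :
    pvL roles (ow :: rest) s =
      if roles.contains k && !(s.contains k) then pvC ow :: pvL roles rest (s.add k)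
      else pvL roles rest (s.add k) := by
  simp only [pvL, hid]

theorem pvStep_none (g m : String) (roles : PySem.Set String) (st : Option (List (String × String)) × Int × Int × Option (List (String × String)) × PySem.Set String)
    (ow : List (String × String)) (hid : pvLookup ow "id" = none) : pvStep g m roles st ow = st := by
  simp only [pvStep, hid]

theorem pvStep_ev (g m : String) (roles : PySem.Set String) (st : Option (List (String × String)) × Int × Int × Option (List (String × String)) × PySem.Set String)
    (ow : List (String × String)) (k : String) (hid : pvLookup ow "id" = some k) :
    (pvStep g m roles st ow).1 = if st.1.isNone && (k == g) then some ow else st.1 := by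
  simp only [pvStep, hid]

theorem pvStep_mem (g m : String) (roles : PySem.Set String) (st : Option (List (String × String)) × Int × Int × Option (List (String × String)) × PySem.Set String)
    (ow : List (String × String)) (k : String) (hid : pvLookup ow "id" = some k) :
    (pvStep g m roles st ow).2.2.2.1 = if st.2.2.2.1.isNone && (k == m) then some ow else st.2.2.2.1 := by
  simp only [pvStep, hid]

theorem pvStep_seen (g m : String) (roles : PySem.Set String) (st : Option (List (String × String)) × Int × Int × Option (List (String × String)) × PySem.Set String)
    (ow : List (String × String)) (k : String) (hid : pvLookup ow "id" = some k) :
    (pvStep g m roles st ow).2.2.2.2 = st.2.2.2.2.add k := by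
  simp only [pvStep, hid]

theorem pvStep_ad (g m : String) (roles : PySem.Set String) (st : Option (List (String × String)) × Int × Int × Option (List (String × String)) × PySem.Set String)
    (ow : List (String × String)) (k : String) (hid : pvLookup ow "id" = some k) :
    ((pvStep g m roles st ow).2.1, (pvStep g m roles st ow).2.2.1) =
      if roles.contains k && !(st.2.2.2.2.contains k) then pvOr (st.2.1, st.2.2.1) (pvC ow)
      else (st.2.1, st.2.2.1) := by
  simp only [pvStep, hid]
  split <;> rfl

theorem pv_cond_iff (roles s : PySem.Set String) (k : String) :
    (roles.contains k && !(s.contains k)) = true ↔ (k ∈ roles ∧ k ∉ s) := by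
  simp [PySem.Set.contains]

theorem pvScan_spec (g m : String) (roles : PySem.Set String) (ows : List (List (String × String))) :
    ∀ (st : Option (List (String × String)) × Int × Int × Option (List (String × String)) × PySem.Set String),
    (ows.foldl (pvStep g m roles) st).1 = st.1.or (ows.find? (fun i => pvLookup i "id" == some g)) ∧
    (ows.foldl (pvStep g m roles) st).2.2.2.1 = st.2.2.2.1.or (ows.find? (fun i => pvLookup i "id" == some m)) ∧
    ((ows.foldl (pvStep g m roles) st).2.1, (ows.foldl (pvStep g m roles) st).2.2.1)
      = List.foldl pvOr (st.2.1, st.2.2.1) (pvL roles ows st.2.2.2.2) := by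
  induction ows with
  | nil => intro st; simp [pvL]
  | cons ow rest ih =>
    intro st
    simp only [List.foldl_cons]
    cases hid : pvLookup ow "id" with
    | none =>
      rw [pvStep_none g m roles st ow hid, List.find?_cons_of_neg (by simp [hid]),
        List.find?_cons_of_neg (by simp [hid]), pvL_cons_none roles ow rest _ hid]
      exact ih st
    | some k =>
      obtain ⟨ih1, ih2, ih3⟩ := ih (pvStep g m roles st ow)
      refine ⟨?_, ?_, ?_⟩
      · rw [ih1, pvStep_ev g m roles st ow k hid]
        by_cases hg : k = g
        · subst hg
          rw [List.find?_cons_of_pos (by simp [hid])]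
          cases hev : st.1 <;> simp [Option.or]
        · rw [List.find?_cons_of_neg (by simp [hid, hg])]
          have : (k == g) = false := by simp [hg]
          rw [this]
          simp
      · rw [ih2, pvStep_mem g m roles st ow k hid]
        by_cases hm : k = m
        · subst hm
          rw [List.find?_cons_of_pos (by simp [hid])]
          cases hmem : st.2.2.2.1 <;> simp [Option.or]
        · rw [List.find?_cons_of_neg (by simp [hid, hm])]
          have : (k == m) = false := by simp [hm]
          rw [this]
          simp
      · rw [ih3, pvStep_seen g m roles st ow k hid, pvStep_ad g m roles st ow k hid,
          pvL_cons_some roles ow rest _ k hid]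
        by_cases hp : k ∈ roles ∧ k ∉ st.2.2.2.2
        · rw [if_pos ((pv_cond_iff roles st.2.2.2.2 k).mpr hp), if_pos ((pv_cond_iff roles st.2.2.2.2 k).mpr hp), List.foldl_cons]
        · rw [if_neg (fun h => hp ((pv_cond_iff roles st.2.2.2.2 k).mp h)),
            if_neg (fun h => hp ((pv_cond_iff roles st.2.2.2.2 k).mp h))]

-- ---- characterisation of A's per-role fold ----
theorem pvA_fold_eq (ows : List (List (String × String))) (rs : List String) : ∀ (a : Int × Int),
    rs.foldl (fun (ad : Int × Int) r =>
        match ows.find? (fun i => pvLookup i "id" == some r) with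
        | some d => (PySem.Int.bor ad.1 (pvInt ((pvLookup d "allow").getD "")), PySem.Int.bor ad.2 (pvInt ((pvLookup d "deny").getD "")))
        | none => ad) a
      = List.foldl pvOr a (rs.filterMap (fun r => (ows.find? (fun i => pvLookup i "id" == some r)).map pvC)) := by
  induction rs with
  | nil => intro a; simp
  | cons r rs ih =>
    intro a
    simp only [List.foldl_cons, List.filterMap_cons]
    cases hf : ows.find? (fun i => pvLookup i "id" == some r) with
    | none => simpa [hf] using ih a
    | some d => simpa [hf, pvOr, pvC] using ih (pvOr a (pvC d))

-- ---- the two contribution lists hold the same masks ----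
theorem pv_mem_pvL (roles : PySem.Set String) (ows : List (List (String × String))) :
    ∀ (s : PySem.Set String) (x : Int × Int),
    x ∈ pvL roles ows s ↔ ∃ k, k ∈ roles ∧ k ∉ s ∧
      ∃ d, ows.find? (fun i => pvLookup i "id" == some k) = some d ∧ x = pvC d := by
  induction ows with
  | nil => intro s x; simp [pvL]
  | cons ow rest ih =>
    intro s x
    cases hid : pvLookup ow "id" with
    | none =>
      rw [pvL_cons_none roles ow rest s hid, ih s x]
      constructor
      · rintro ⟨k, hr, hs, d, hf, hx⟩
        exact ⟨k, hr, hs, d, by rw [List.find?_cons_of_neg (by simp [hid])]; exact hf, hx⟩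
      · rintro ⟨k, hr, hs, d, hf, hx⟩
        rw [List.find?_cons_of_neg (by simp [hid])] at hf
        exact ⟨k, hr, hs, d, hf, hx⟩
    | some k0 =>
      have hadd : ∀ k : String, k ∉ s.add k0 ↔ k ∉ s ∧ k ≠ k0 := by
        intro k
        rw [PySem.Set.mem_add]
        tauto
      by_cases hp : k0 ∈ roles ∧ k0 ∉ s
      · have hL : pvL roles (ow :: rest) s = pvC ow :: pvL roles rest (s.add k0) := by
          rw [pvL_cons_some roles ow rest s k0 hid, if_pos ((pv_cond_iff roles s k0).mpr hp)]
        rw [hL]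
        simp only [List.mem_cons, ih (s.add k0) x]
        constructor
        · rintro (rfl | ⟨k, hr, hs, d, hf, hx⟩)
          · exact ⟨k0, hp.1, hp.2, ow, List.find?_cons_of_pos (by simp [hid]), rfl⟩
          · rcases (hadd k).mp hs with ⟨hs', hk⟩
            exact ⟨k, hr, hs', d,
              by rw [List.find?_cons_of_neg (by simp [hid]; exact fun h => hk h.symm)]; exact hf, hx⟩
        · rintro ⟨k, hr, hs, d, hf, hx⟩
          by_cases hk : k = k0
          · subst hk
            rw [List.find?_cons_of_pos (by simp [hid])] at hf
            cases hf
            exact Or.inl hx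
          · rw [List.find?_cons_of_neg (by simp [hid]; exact fun h => hk h.symm)] at hf
            exact Or.inr ⟨k, hr, (hadd k).mpr ⟨hs, hk⟩, d, hf, hx⟩
      · have hL : pvL roles (ow :: rest) s = pvL roles rest (s.add k0) := by
          rw [pvL_cons_some roles ow rest s k0 hid,
            if_neg (fun h => hp ((pv_cond_iff roles s k0).mp h))]
        rw [hL, ih (s.add k0) x]
        constructor
        · rintro ⟨k, hr, hs, d, hf, hx⟩
          rcases (hadd k).mp hs with ⟨hs', hk⟩
          exact ⟨k, hr, hs', d,
            by rw [List.find?_cons_of_neg (by simp [hid]; exact fun h => hk h.symm)]; exact hf, hx⟩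
        · rintro ⟨k, hr, hs, d, hf, hx⟩
          by_cases hk : k = k0
          · exact absurd ⟨hk ▸ hr, hk ▸ hs⟩ hp
          · rw [List.find?_cons_of_neg (by simp [hid]; exact fun h => hk h.symm)] at hf
            exact ⟨k, hr, (hadd k).mpr ⟨hs, hk⟩, d, hf, hx⟩

theorem pv_contribs_same (ows : List (List (String × String))) (rs : List String) (x : Int × Int) :
    x ∈ pvL (PySem.Set.ofList rs) ows PySem.Set.empty ↔
    x ∈ rs.filterMap (fun r => (ows.find? (fun i => pvLookup i "id" == some r)).map pvC) := by
  rw [pv_mem_pvL, List.mem_filterMap]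
  constructor
  · rintro ⟨k, hr, -, d, hf, rfl⟩
    exact ⟨k, (PySem.Set.mem_ofList rs k).mp hr, by simp [hf]⟩
  · rintro ⟨k, hk, hmap⟩
    rcases Option.map_eq_some_iff.mp hmap with ⟨d, hf, rfl⟩
    exact ⟨k, (PySem.Set.mem_ofList rs k).mpr hk, by simp [PySem.Set.empty], d, hf, rfl⟩

-- ===== VERDICT (by name: the statement is the Claim_ definition above) =====
theorem calculate_overwrites_spec : Claim_equal_calculate_overwrites := by
  intro member_id guild_id base_permissions channel_overwrites member_roles _ _
  unfold Spec_calculate_overwrites calculate_overwrites calculate_overwrites_alt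
  by_cases hadm : PySem.Int.band base_permissions 8 = 8
  · simp [hadm]
  · simp only [hadm, if_false]
    obtain ⟨h1, h2, h3⟩ := pvScan_spec guild_id member_id (PySem.Set.ofList member_roles)
      channel_overwrites (none, (0 : Int), (0 : Int), none, PySem.Set.empty)
    simp only [Option.or] at h1 h2
    rw [h1, h2]
    have hbig : List.foldl pvOr ((0 : Int), (0 : Int))
        (pvL (PySem.Set.ofList member_roles) channel_overwrites PySem.Set.empty)
        = List.foldl pvOr ((0 : Int), (0 : Int))
          (member_roles.filterMap (fun r => (channel_overwrites.find? (fun i => pvLookup i "id" == some r)).map pvC)) :=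
      pv_big_set_eq _ _ (pv_contribs_same channel_overwrites member_roles)
    have h3' := h3
    rw [hbig] at h3'
    rw [pvA_fold_eq]
    rw [← h3']
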